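-- pv_equiv track=rewrite | github.com/Bobur-Boboyev/codewars | Diophantine Equation.py | sol_equa
-- ===== SOURCE A (Python) =====
-- def sol_equa(n):
--     result = []
--     for a in range(1, int(n**0.5) + 1):
--         if n % a == 0:
--             b = n // a
--             if (a + b) % 2 == 0 and (b - a) % 4 == 0:
--                 x = (a + b) // 2
--                 y = (b - a) // 4
--                 result.append([x, y])
--     result.sort(reverse=True, key=lambda pair: pair[0])
--     return result
-- ===== SOURCE B (Python) =====
-- def sol_equa(n):
--     # x^2 - 4y^2 = (x-2y)(x+2y) = n ; a = x-2y, b = x+2y must share parity and b-a % 4 == 0.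
--     # Case split on n mod 4: odd n -> both factors odd (scan odd a only);
--     # n % 4 == 2 -> impossible; n % 4 == 0 -> a = 2a', b = 2b' with a'b' = n//4 and a' = b' (mod 2).
--     # Ascending a gives descending x, so the result is already sorted: no sort needed.
--     result = []
--     r = n % 4
--     if r == 1 or r == 3:
--         a = 1
--         while a * a <= n:
--             if n % a == 0 and (n // a - a) % 4 == 0:
--                 b = n // a
--                 result.append([(a + b) // 2, (b - a) // 4])
--             a += 2
--     elif r == 0:
--         m = n // 4
--         a = 1
--         while a * a <= m:
--             if m % a == 0 and (m // a - a) % 2 == 0: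
--                 b = m // a
--                 result.append([a + b, (b - a) // 2])
--             a += 1
--     return result
-- ===== Notes on version B (the rewrite author's own statement) =====
-- stated objective: alternative
-- what changed: B splits on the residue of n modulo four and enumerates factorizations case-wise (odd divisors only for odd n; divisors of the quarter of n when n is a multiple of four; nothing in the remaining residue class), emitting results already in descending-x order so A's final sort disappears.
-- crash fix: On negative n, A raises TypeError (int() of a complex square root); B naturally returns an empty list. — e.g. on sol_equa(-1): A raises TypeError, B returns []
import Mathlib
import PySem

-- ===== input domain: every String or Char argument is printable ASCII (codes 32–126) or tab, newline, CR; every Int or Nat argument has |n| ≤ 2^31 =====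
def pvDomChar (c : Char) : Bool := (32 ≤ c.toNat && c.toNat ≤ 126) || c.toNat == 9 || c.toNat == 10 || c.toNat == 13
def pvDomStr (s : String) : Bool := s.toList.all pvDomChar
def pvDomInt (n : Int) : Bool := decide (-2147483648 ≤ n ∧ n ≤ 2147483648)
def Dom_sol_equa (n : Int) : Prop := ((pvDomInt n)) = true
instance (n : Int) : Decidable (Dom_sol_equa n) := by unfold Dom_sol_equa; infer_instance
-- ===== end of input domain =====

-- B replaces A's divisor scan + sort by a case split on n mod 4 (odd divisors for odd n,
-- divisors of n//4 when 4 | n, nothing when n % 4 == 2), emitted already in descending-x order.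

-- ===== PORT A =====
-- int(n**0.5) is modeled as the integer square root: exact on the admitted domain 0 ≤ n ≤ 2^31
-- (float sqrt of such ints truncates to Nat.sqrt); for n < 0 Python raises (outside Pre_).
def sol_equa (n : Int) : List (List Int) :=
  let s : Int := (Nat.sqrt n.toNat : Int)
  let result : List (List Int) :=
    (PySem.List.pyRange 1 (s + 1) 1).foldl (fun result a =>
      if PySem.Int.mod n a = 0 then
        let b := PySem.Int.floordiv n a
        if PySem.Int.mod (a + b) 2 = 0 ∧ PySem.Int.mod (b - a) 4 = 0 then
          result ++ [[PySem.Int.floordiv (a + b) 2, PySem.Int.floordiv (b - a) 4]]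
        else result
      else result) []
  -- result.sort(reverse=True, key=lambda pair: pair[0]); every entry has length 2, so pair[0] is pyGetD pair 0 0
  PySem.List.sorted result (fun pair => PySem.List.pyGetD pair 0 0) true

-- ===== PORT B =====
-- 'while a * a <= n: … ; a += 2' of Source B's odd-n branch; the Nat argument is a fuel bound,
-- a pure totality guard (never reached: the loop stops once a > n, and the call site passes enough).
def solEquaGoOdd (n : Int) : Nat → Int → List (List Int)
  | 0, _ => []
  | fuel + 1, a =>
    if a * a ≤ n then
      (if PySem.Int.mod n a = 0 ∧ PySem.Int.mod (PySem.Int.floordiv n a - a) 4 = 0 then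
          [[PySem.Int.floordiv (a + PySem.Int.floordiv n a) 2,
            PySem.Int.floordiv (PySem.Int.floordiv n a - a) 4]]
        else []) ++ solEquaGoOdd n fuel (a + 2)
    else []

-- 'while a * a <= m: … ; a += 1' of Source B's (4 | n)-branch, same fuel guard.
def solEquaGoEven (m : Int) : Nat → Int → List (List Int)
  | 0, _ => []
  | fuel + 1, a =>
    if a * a ≤ m then
      (if PySem.Int.mod m a = 0 ∧ PySem.Int.mod (PySem.Int.floordiv m a - a) 2 = 0 then
          [[a + PySem.Int.floordiv m a,
            PySem.Int.floordiv (PySem.Int.floordiv m a - a) 2]]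
        else []) ++ solEquaGoEven m fuel (a + 1)
    else []

def sol_equa_alt (n : Int) : List (List Int) :=
  let r := PySem.Int.mod n 4
  if r = 1 ∨ r = 3 then solEquaGoOdd n (n.toNat + 1) 1
  else if r = 0 then
    let m := PySem.Int.floordiv n 4
    solEquaGoEven m (m.toNat + 1) 1
  else []

-- ===== PRECONDITION & SPEC =====
-- Pre_ excludes exactly n < 0, where A raises TypeError (int() of the complex n**0.5).
def Pre_sol_equa (n : Int) : Prop := 0 ≤ n
instance (n : Int) : Decidable (Pre_sol_equa n) := by unfold Pre_sol_equa; infer_instance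
def pvWitness_sol_equa : Int := (5)

-- On negative n, A raises TypeError (int() of a complex square root); B naturally returns [].
def Raises_sol_equa (n : Int) : Prop := n < 0
instance (n : Int) : Decidable (Raises_sol_equa n) := by unfold Raises_sol_equa; infer_instance
def pvRaiseWitness_sol_equa : Int := (-1)
def pvRaiseWitnessOut_sol_equa : List (List Int) := []

def Spec_sol_equa (n : Int) (out : List (List Int)) : Prop := out = sol_equa_alt n
instance (n : Int) (out : List (List Int)) : Decidable (Spec_sol_equa n out) := by unfold Spec_sol_equa; infer_instance

-- ===== CLAIM (what is proved, stated in full; the proofs are below) =====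
def Claim_equal_sol_equa : Prop := ∀ (n : Int), Dom_sol_equa n → Pre_sol_equa n → Spec_sol_equa n (sol_equa n)
def Claim_raises_sol_equa : Prop := (∀ (n : Int), Dom_sol_equa n → Raises_sol_equa n → ¬ Pre_sol_equa n) ∧ (Dom_sol_equa (pvRaiseWitness_sol_equa) ∧ Raises_sol_equa (pvRaiseWitness_sol_equa) ∧ sol_equa_alt (pvRaiseWitness_sol_equa) = pvRaiseWitnessOut_sol_equa)

-- ===== LEMMAS AND PROOFS =====

-- canonical description of an accepted divisor pair of A (Int ediv/emod throughout)
def SolA (n a : Int) : Prop :=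
  1 ≤ a ∧ a * a ≤ n ∧ a ∣ n ∧ 2 ∣ (a + n / a) ∧ 4 ∣ (n / a - a)

def entA (n a : Int) : List Int := [(a + n / a) / 2, (n / a - a) / 4]

-- A's loop result, written as a filterMap over the same range
def solACore (n : Int) : List (List Int) :=
  (PySem.List.pyRange 1 ((Nat.sqrt n.toNat : Int) + 1) 1).filterMap (fun a =>
    if PySem.Int.mod n a = 0 ∧
        (PySem.Int.mod (a + PySem.Int.floordiv n a) 2 = 0 ∧
         PySem.Int.mod (PySem.Int.floordiv n a - a) 4 = 0) then
      some [PySem.Int.floordiv (a + PySem.Int.floordiv n a) 2,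
            PySem.Int.floordiv (PySem.Int.floordiv n a - a) 4]
    else none)

-- the strict "descending heads" order relation the lists are aligned by
def rHead (p q : List Int) : Prop := PySem.List.pyGetD q 0 0 < PySem.List.pyGetD p 0 0

lemma foldl_if_append {α β : Type} (p : α → Prop) [DecidablePred p] (f : α → β)
    (xs : List α) (acc : List β) :
    xs.foldl (fun r a => if p a then r ++ [f a] else r) acc
      = acc ++ xs.filterMap (fun a => if p a then some (f a) else none) := by
  induction xs generalizing acc with
  | nil => simp
  | cons x xs ih => by_cases h : p x <;> simp [List.foldl, h, ih]

lemma sol_equa_eq_sorted_core (n : Int) :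
    sol_equa n = PySem.List.sorted (solACore n) (fun pair => PySem.List.pyGetD pair 0 0) true := by
  simp only [sol_equa]
  congr 1
  have hb : (fun (result : List (List Int)) (a : Int) =>
      if PySem.Int.mod n a = 0 then
        if PySem.Int.mod (a + PySem.Int.floordiv n a) 2 = 0 ∧
            PySem.Int.mod (PySem.Int.floordiv n a - a) 4 = 0 then
          result ++ [[PySem.Int.floordiv (a + PySem.Int.floordiv n a) 2,
                      PySem.Int.floordiv (PySem.Int.floordiv n a - a) 4]]
        else result
      else result)
      = (fun (result : List (List Int)) (a : Int) =>
          if PySem.Int.mod n a = 0 ∧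
              (PySem.Int.mod (a + PySem.Int.floordiv n a) 2 = 0 ∧
               PySem.Int.mod (PySem.Int.floordiv n a - a) 4 = 0) then
            result ++ [[PySem.Int.floordiv (a + PySem.Int.floordiv n a) 2,
                        PySem.Int.floordiv (PySem.Int.floordiv n a - a) 4]]
          else result) := by
    funext r a
    by_cases h1 : PySem.Int.mod n a = 0 <;>
      by_cases h2 : PySem.Int.mod (a + PySem.Int.floordiv n a) 2 = 0 ∧
          PySem.Int.mod (PySem.Int.floordiv n a - a) 4 = 0 <;>
      simp [h1]
  rw [hb, foldl_if_append
    (fun a => PySem.Int.mod n a = 0 ∧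
      (PySem.Int.mod (a + PySem.Int.floordiv n a) 2 = 0 ∧
       PySem.Int.mod (PySem.Int.floordiv n a - a) 4 = 0))
    (fun a => [PySem.Int.floordiv (a + PySem.Int.floordiv n a) 2,
               PySem.Int.floordiv (PySem.Int.floordiv n a - a) 4])]
  simp [solACore]

lemma le_sqrt_int {n a : Int} (hn : 0 ≤ n) (ha : 1 ≤ a) :
    a ≤ (Nat.sqrt n.toNat : Int) ↔ a * a ≤ n := by
  obtain ⟨k, rfl⟩ : ∃ k : Nat, a = (k : Int) := ⟨a.toNat, (Int.toNat_of_nonneg (by omega)).symm⟩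
  obtain ⟨m, rfl⟩ : ∃ m : Nat, n = (m : Int) := ⟨n.toNat, (Int.toNat_of_nonneg hn).symm⟩
  rw [Int.toNat_natCast]
  exact_mod_cast Nat.le_sqrt

-- turning the port's PySem conditions at a positive a into Int ediv/emod facts
lemma pysem_conv {x a : Int} (ha : 0 < a) :
    PySem.Int.mod x a = x % a ∧ PySem.Int.floordiv x a = x / a :=
  ⟨PySem.Int.mod_eq_emod_of_pos ha, PySem.Int.floordiv_eq_ediv_of_pos ha⟩

lemma mem_solACore {n : Int} (hn : 0 ≤ n) (p : List Int) :
    p ∈ solACore n ↔ ∃ a, SolA n a ∧ p = entA n a := by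
  unfold solACore
  rw [List.mem_filterMap]
  constructor
  · rintro ⟨a, hmem, hsome⟩
    obtain ⟨h1, h2⟩ := PySem.List.mem_pyRange_one.mp hmem
    have ha : 0 < a := by omega
    obtain ⟨hm, hd⟩ := pysem_conv (x := n) ha
    rw [hm, hd] at hsome
    split at hsome
    · rename_i hc
      obtain ⟨hc1, hc2, hc3⟩ := hc
      rw [(pysem_conv (x := a + n / a) (by norm_num : (0:Int) < 2)).1] at hc2
      rw [(pysem_conv (x := n / a - a) (by norm_num : (0:Int) < 4)).1] at hc3
      rw [(pysem_conv (x := a + n / a) (by norm_num : (0:Int) < 2)).2,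
          (pysem_conv (x := n / a - a) (by norm_num : (0:Int) < 4)).2] at hsome
      refine ⟨a, ⟨h1, (le_sqrt_int hn h1).mp (by omega), ?_, ?_, ?_⟩, ?_⟩
      · exact (PySem.Int.emod_eq_zero_iff_dvd n a).mp hc1
      · exact (PySem.Int.emod_eq_zero_iff_dvd _ 2).mp hc2
      · exact (PySem.Int.emod_eq_zero_iff_dvd _ 4).mp hc3
      · simpa [entA] using hsome.symm
    · exact absurd hsome (by simp)
  · rintro ⟨a, ⟨h1, h2, h3, h4, h5⟩, rfl⟩
    have ha : 0 < a := by omega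
    refine ⟨a, PySem.List.mem_pyRange_one.mpr ⟨h1, by
      have := (le_sqrt_int hn h1).mpr h2; omega⟩, ?_⟩
    obtain ⟨hm, hd⟩ := pysem_conv (x := n) ha
    rw [hm, hd,
        (pysem_conv (x := a + n / a) (by norm_num : (0:Int) < 2)).1,
        (pysem_conv (x := n / a - a) (by norm_num : (0:Int) < 4)).1,
        (pysem_conv (x := a + n / a) (by norm_num : (0:Int) < 2)).2,
        (pysem_conv (x := n / a - a) (by norm_num : (0:Int) < 4)).2]
    rw [if_pos ⟨(PySem.Int.emod_eq_zero_iff_dvd n a).mpr h3,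
        (PySem.Int.emod_eq_zero_iff_dvd _ 2).mpr h4,
        (PySem.Int.emod_eq_zero_iff_dvd _ 4).mpr h5⟩]
    simp [entA]

lemma mem_goOdd {n : Int} (fuel : Nat) (a : Int) (ha : 1 ≤ a)
    (hf : n < a + 2 * (fuel : Int)) (p : List Int) :
    p ∈ solEquaGoOdd n fuel a ↔
      ∃ c, a ≤ c ∧ 2 ∣ (c - a) ∧ c * c ≤ n ∧ c ∣ n ∧ 4 ∣ (n / c - c) ∧ p = entA n c := by
  induction fuel generalizing a with
  | zero =>
    simp only [solEquaGoOdd, List.not_mem_nil, false_iff]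
    rintro ⟨c, hc1, _, hc3, _, _, _⟩
    push_cast at hf
    nlinarith
  | succ fuel ih =>
    simp only [solEquaGoOdd]
    by_cases hle : a * a ≤ n
    · rw [if_pos hle]
      have ha0 : 0 < a := by omega
      obtain ⟨hm, hd⟩ := pysem_conv (x := n) ha0
      rw [List.mem_append,
          ih (a + 2) (by omega) (by push_cast at hf ⊢; omega)]
      constructor
      · rintro (hx | ⟨c, hc⟩)
        · split at hx
          · rename_i hc
            obtain ⟨hc1, hc2⟩ := hc
            rw [hm] at hc1; rw [hd] at hc2 hx
            rw [(pysem_conv (x := n / a - a) (by norm_num : (0:Int) < 4)).1] at hc2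
            rw [(pysem_conv (x := a + n / a) (by norm_num : (0:Int) < 2)).2,
                (pysem_conv (x := n / a - a) (by norm_num : (0:Int) < 4)).2] at hx
            simp only [List.mem_singleton] at hx
            exact ⟨a, le_refl a, by omega, hle,
              (PySem.Int.emod_eq_zero_iff_dvd n a).mp hc1,
              (PySem.Int.emod_eq_zero_iff_dvd _ 4).mp hc2, by simpa [entA] using hx⟩
          · simp at hx
        · exact ⟨c, by omega, by omega, hc.2.2.1, hc.2.2.2.1, hc.2.2.2.2.1, hc.2.2.2.2.2⟩
      · rintro ⟨c, hc1, hc2, hc3, hc4, hc5, hc6⟩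
        by_cases hca : c = a
        · subst hca
          left
          rw [hm, hd,
              (pysem_conv (x := n / c - c) (by norm_num : (0:Int) < 4)).1,
              (pysem_conv (x := c + n / c) (by norm_num : (0:Int) < 2)).2,
              (pysem_conv (x := n / c - c) (by norm_num : (0:Int) < 4)).2]
          rw [if_pos ⟨(PySem.Int.emod_eq_zero_iff_dvd n c).mpr hc4,
              (PySem.Int.emod_eq_zero_iff_dvd _ 4).mpr hc5⟩]
          simpa [entA] using hc6
        · exact Or.inr ⟨c, by omega, by omega, hc3, hc4, hc5, hc6⟩
    · rw [if_neg hle]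
      simp only [List.not_mem_nil, false_iff]
      rintro ⟨c, hc1, _, hc3, _, _, _⟩
      nlinarith

lemma mem_goEven {m : Int} (fuel : Nat) (a : Int) (ha : 1 ≤ a)
    (hf : m < a + (fuel : Int)) (p : List Int) :
    p ∈ solEquaGoEven m fuel a ↔
      ∃ c, a ≤ c ∧ c * c ≤ m ∧ c ∣ m ∧ 2 ∣ (m / c - c) ∧ p = [c + m / c, (m / c - c) / 2] := by
  induction fuel generalizing a with
  | zero =>
    simp only [solEquaGoEven, List.not_mem_nil, false_iff]
    rintro ⟨c, hc1, hc2, _, _, _⟩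
    push_cast at hf
    nlinarith
  | succ fuel ih =>
    simp only [solEquaGoEven]
    by_cases hle : a * a ≤ m
    · rw [if_pos hle]
      have ha0 : 0 < a := by omega
      obtain ⟨hm, hd⟩ := pysem_conv (x := m) ha0
      rw [List.mem_append, ih (a + 1) (by omega) (by push_cast at hf ⊢; omega)]
      constructor
      · rintro (hx | ⟨c, hc⟩)
        · split at hx
          · rename_i hc
            obtain ⟨hc1, hc2⟩ := hc
            rw [hm] at hc1; rw [hd] at hc2 hx
            rw [(pysem_conv (x := m / a - a) (by norm_num : (0:Int) < 2)).1] at hc2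
            rw [(pysem_conv (x := m / a - a) (by norm_num : (0:Int) < 2)).2] at hx
            simp only [List.mem_singleton] at hx
            exact ⟨a, le_refl a, hle,
              (PySem.Int.emod_eq_zero_iff_dvd m a).mp hc1,
              (PySem.Int.emod_eq_zero_iff_dvd _ 2).mp hc2, hx⟩
          · simp at hx
        · exact ⟨c, by omega, hc.2.1, hc.2.2.1, hc.2.2.2.1, hc.2.2.2.2⟩
      · rintro ⟨c, hc1, hc2, hc3, hc4, hc5⟩
        by_cases hca : c = a
        · subst hca
          left
          rw [hm, hd,
              (pysem_conv (x := m / c - c) (by norm_num : (0:Int) < 2)).1,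
              (pysem_conv (x := m / c - c) (by norm_num : (0:Int) < 2)).2]
          rw [if_pos ⟨(PySem.Int.emod_eq_zero_iff_dvd m c).mpr hc3,
              (PySem.Int.emod_eq_zero_iff_dvd _ 2).mpr hc4⟩]
          simpa using hc5
        · exact Or.inr ⟨c, by omega, hc2, hc3, hc4, hc5⟩
    · rw [if_neg hle]
      simp only [List.not_mem_nil, false_iff]
      rintro ⟨c, hc1, hc2, _, _, _⟩
      nlinarith

-- the shared arithmetic core: a larger admitted divisor gives a strictly smaller a + n/a
lemma sum_lt {n a c : Int} (ha : 1 ≤ a) (hac : a < c) (hda : a ∣ n) (hdc : c ∣ n)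
    (hc2 : c * c ≤ n) : c + n / c < a + n / a := by
  obtain ⟨b1, hb1⟩ := hda
  obtain ⟨b2, hb2⟩ := hdc
  have ha0 : (0:Int) < a := by omega
  have hc0 : (0:Int) < c := by omega
  have e1 : n / a = b1 := by rw [hb1]; exact Int.mul_ediv_cancel_left _ (by omega)
  have e2 : n / c = b2 := by rw [hb2]; exact Int.mul_ediv_cancel_left _ (by omega)
  rw [e1, e2]
  have hacn : a * c < n := by nlinarith
  have key : (a + b1 - (c + b2)) * (a * c) = (c - a) * (n - a * c) := by
    linear_combination (-c) * hb1 + a * hb2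
  have hpos : 0 < (c - a) * (n - a * c) := mul_pos (by omega) (by omega)
  nlinarith [mul_pos ha0 hc0]

-- an odd n has only odd divisors, so a + n/a is even for every divisor
lemma odd_div {n a : Int} (hodd : ¬ (2:Int) ∣ n) (hd : a ∣ n) :
    ¬ 2 ∣ a ∧ ¬ 2 ∣ (n / a) := by
  have h1 : ¬ 2 ∣ a := fun h => hodd (h.trans hd)
  have h2 : n / a * a = n := Int.ediv_mul_cancel hd
  exact ⟨h1, fun h => hodd (by rw [← h2]; exact h.mul_right a)⟩

lemma pairwise_goOdd {n : Int} (hodd : ¬ (2:Int) ∣ n) (fuel : Nat) (a : Int) (ha : 1 ≤ a)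
    (hf : n < a + 2 * (fuel : Int)) :
    List.Pairwise rHead (solEquaGoOdd n fuel a) := by
  induction fuel generalizing a with
  | zero => simp [solEquaGoOdd]
  | succ fuel ih =>
    simp only [solEquaGoOdd]
    by_cases hle : a * a ≤ n
    · rw [if_pos hle]
      have hrec := ih (a + 2) (by omega) (by push_cast at hf ⊢; omega)
      refine List.pairwise_append.mpr ⟨?_, hrec, ?_⟩
      · split <;> simp
      · intro p hp q hq
        have hq' := (mem_goOdd fuel (a + 2) (by omega)
          (by push_cast at hf ⊢; omega) q).mp hq
        obtain ⟨c, hc1, _, hc3, hc4, _, rfl⟩ := hq'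
        split at hp
        · rename_i hcnd
          obtain ⟨hcnd1, _⟩ := hcnd
          rw [(pysem_conv (by omega : (0:Int) < a)).1] at hcnd1
          have hda : a ∣ n := (PySem.Int.emod_eq_zero_iff_dvd n a).mp hcnd1
          simp only [List.mem_singleton] at hp
          subst hp
          have hsum := sum_lt ha (by omega : a < c) hda hc4 hc3
          obtain ⟨hoa1, hoa2⟩ := odd_div hodd hda
          obtain ⟨hoc1, hoc2⟩ := odd_div hodd hc4
          unfold rHead entA
          rw [(pysem_conv (by omega : (0:Int) < a)).2,
              (pysem_conv (by norm_num : (0:Int) < 2)).2,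
              (pysem_conv (by norm_num : (0:Int) < 4)).2]
          simp only [PySem.List.pyGetD_zero_cons]
          omega
        · simp at hp
    · rw [if_neg hle]; simp

lemma pairwise_goEven {m : Int} (fuel : Nat) (a : Int) (ha : 1 ≤ a)
    (hf : m < a + (fuel : Int)) :
    List.Pairwise rHead (solEquaGoEven m fuel a) := by
  induction fuel generalizing a with
  | zero => simp [solEquaGoEven]
  | succ fuel ih =>
    simp only [solEquaGoEven]
    by_cases hle : a * a ≤ m
    · rw [if_pos hle]
      have hrec := ih (a + 1) (by omega) (by push_cast at hf ⊢; omega)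
      refine List.pairwise_append.mpr ⟨?_, hrec, ?_⟩
      · split <;> simp
      · intro p hp q hq
        have hq' := (mem_goEven fuel (a + 1) (by omega)
          (by push_cast at hf ⊢; omega) q).mp hq
        obtain ⟨c, hc1, hc2, hc3, _, rfl⟩ := hq'
        split at hp
        · rename_i hcnd
          obtain ⟨hcnd1, _⟩ := hcnd
          rw [(pysem_conv (by omega : (0:Int) < a)).1] at hcnd1
          have hda : a ∣ m := (PySem.Int.emod_eq_zero_iff_dvd m a).mp hcnd1
          simp only [List.mem_singleton] at hp
          subst hp
          have hsum := sum_lt ha (by omega : a < c) hda hc3 hc2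
          unfold rHead
          rw [(pysem_conv (by omega : (0:Int) < a)).2,
              (pysem_conv (by norm_num : (0:Int) < 2)).2]
          simp only [PySem.List.pyGetD_zero_cons]
          omega
        · simp at hp
    · rw [if_neg hle]; simp

lemma pairwise_solACore {n : Int} (hn : 0 ≤ n) : List.Pairwise rHead (solACore n) := by
  unfold solACore
  rw [List.pairwise_filterMap]
  refine (PySem.List.pairwise_lt_pyRange_one 1 _).imp_of_mem ?_
  intro a c hma hmc hlt p hp q hq
  obtain ⟨ha1, ha2⟩ := PySem.List.mem_pyRange_one.mp hma
  obtain ⟨hc1, hc2⟩ := PySem.List.mem_pyRange_one.mp hmc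
  split at hp; swap; · exact absurd hp (by simp)
  split at hq; swap; · exact absurd hq (by simp)
  rename_i hca hcc
  obtain ⟨ha3, ha4, ha5⟩ := hca
  obtain ⟨hc3, hc4, hc5⟩ := hcc
  rw [(pysem_conv (by omega : (0:Int) < a)).1] at ha3
  rw [(pysem_conv (by omega : (0:Int) < c)).1] at hc3
  rw [(pysem_conv (by omega : (0:Int) < a)).2,
      (pysem_conv (by norm_num : (0:Int) < 2)).1] at ha4
  rw [(pysem_conv (by omega : (0:Int) < c)).2,
      (pysem_conv (by norm_num : (0:Int) < 2)).1] at hc4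
  have hda : a ∣ n := (PySem.Int.emod_eq_zero_iff_dvd n a).mp ha3
  have hdc : c ∣ n := (PySem.Int.emod_eq_zero_iff_dvd n c).mp hc3
  have hea : (2:Int) ∣ (a + n / a) := (PySem.Int.emod_eq_zero_iff_dvd _ 2).mp ha4
  have hec : (2:Int) ∣ (c + n / c) := (PySem.Int.emod_eq_zero_iff_dvd _ 2).mp hc4
  have hcc2 : c * c ≤ n := (le_sqrt_int hn (by omega)).mp (by omega)
  have hsum := sum_lt ha1 hlt hda hdc hcc2
  cases hp; cases hq
  unfold rHead
  rw [(pysem_conv (by omega : (0:Int) < a)).2,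
      (pysem_conv (by omega : (0:Int) < c)).2,
      (pysem_conv (by norm_num : (0:Int) < 2)).2,
      (pysem_conv (by norm_num : (0:Int) < 2)).2]
  simp only [PySem.List.pyGetD_zero_cons]
  omega

lemma nodup_of_pairwise_rHead {l : List (List Int)} (h : List.Pairwise rHead l) :
    l.Nodup :=
  h.imp (fun hpq => by rintro rfl; exact lt_irrefl _ hpq)

-- odd n: A's parity test is automatic and every divisor is odd
lemma odd_bridge {n : Int} (hodd : ¬ (2:Int) ∣ n) (p : List Int) :
    (∃ a, SolA n a ∧ p = entA n a) ↔
      (∃ c, 1 ≤ c ∧ 2 ∣ (c - 1) ∧ c * c ≤ n ∧ c ∣ n ∧ 4 ∣ (n / c - c) ∧ p = entA n c) := by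
  constructor
  · rintro ⟨a, ⟨h1, h2, h3, h4, h5⟩, rfl⟩
    obtain ⟨hoa, _⟩ := odd_div hodd h3
    exact ⟨a, h1, by omega, h2, h3, h5, rfl⟩
  · rintro ⟨c, h1, h2, h3, h4, h5, rfl⟩
    obtain ⟨hoc, hob⟩ := odd_div hodd h4
    exact ⟨c, ⟨h1, h3, h4, by omega, h5⟩, rfl⟩

-- n = 4m: accepted pairs of A are exactly the doubled factorizations of m
lemma even_bridge {n m : Int} (hm : n = 4 * m) (p : List Int) :
    (∃ a, SolA n a ∧ p = entA n a) ↔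
      (∃ c, 1 ≤ c ∧ c * c ≤ m ∧ c ∣ m ∧ 2 ∣ (m / c - c) ∧ p = [c + m / c, (m / c - c) / 2]) := by
  constructor
  · rintro ⟨a, ⟨h1, h2, h3, h4, h5⟩, rfl⟩
    obtain ⟨b, hb⟩ := h3
    have hdiv : n / a = b := by rw [hb]; exact Int.mul_ediv_cancel_left _ (by omega)
    rw [hdiv] at h4 h5
    have h2a : (2:Int) ∣ a := by
      by_contra hna
      have h2ab : (2:Int) ∣ a * b := by rw [← hb, hm]; exact ⟨2 * m, by ring⟩
      rcases Int.prime_two.dvd_or_dvd h2ab with h | h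
      · exact hna h
      · omega
    have h2b : (2:Int) ∣ b := by omega
    obtain ⟨a', rfl⟩ := h2a
    obtain ⟨b', rfl⟩ := h2b
    have hmab : m = a' * b' := by
      have e : (4:Int) * (a' * b') = 4 * m := by rw [← hm, hb]; ring
      exact (mul_left_cancel₀ (by norm_num : (4:Int) ≠ 0) e).symm
    have ha' : 1 ≤ a' := by omega
    have hdiv' : m / a' = b' := by rw [hmab]; exact Int.mul_ediv_cancel_left _ (by omega)
    refine ⟨a', ha', ?_, ⟨b', hmab⟩, ?_, ?_⟩
    · have e : (2 * a') * (2 * a') = 4 * (a' * a') := by ring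
      rw [e, hm] at h2
      omega
    · rw [hdiv']; omega
    · obtain ⟨k, hk⟩ := h5
      unfold entA
      rw [hdiv, hdiv']
      have e1 : 2 * a' + 2 * b' = 2 * (a' + b') := by ring
      have e2 : 2 * b' - 2 * a' = 4 * k := by omega
      have e3 : b' - a' = 2 * k := by omega
      rw [e1, e2, e3, Int.mul_ediv_cancel_left _ (by norm_num : (2:Int) ≠ 0),
          Int.mul_ediv_cancel_left _ (by norm_num : (4:Int) ≠ 0),
          Int.mul_ediv_cancel_left _ (by norm_num : (2:Int) ≠ 0)]
  · rintro ⟨c, h1, h2, h3, h4, rfl⟩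
    obtain ⟨b', hb'⟩ := h3
    have hdiv' : m / c = b' := by rw [hb']; exact Int.mul_ediv_cancel_left _ (by omega)
    rw [hdiv'] at h4 ⊢
    have hn2 : n = (2 * c) * (2 * b') := by rw [hm, hb']; ring
    have hdiv : n / (2 * c) = 2 * b' := by rw [hn2]; exact Int.mul_ediv_cancel_left _ (by omega)
    obtain ⟨k, hk⟩ := h4
    refine ⟨2 * c, ⟨by omega, ?_, ⟨2 * b', hn2⟩, ?_, ?_⟩, ?_⟩
    · have e : (2 * c) * (2 * c) = 4 * (c * c) := by ring
      rw [e, hm]; omega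
    · rw [hdiv]; omega
    · rw [hdiv]; omega
    · unfold entA
      rw [hdiv]
      have e1 : 2 * c + 2 * b' = 2 * (c + b') := by ring
      have e2 : 2 * b' - 2 * c = 4 * k := by omega
      have e3 : b' - c = 2 * k := by omega
      rw [e1, e2, e3, Int.mul_ediv_cancel_left _ (by norm_num : (2:Int) ≠ 0),
          Int.mul_ediv_cancel_left _ (by norm_num : (4:Int) ≠ 0),
          Int.mul_ediv_cancel_left _ (by norm_num : (2:Int) ≠ 0)]

-- n = 2 (mod 4): the two parity tests can never both pass
lemma no_sol_case2 {n : Int} (h2 : n % 4 = 2) : ∀ a, ¬ SolA n a := by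
  rintro a ⟨h1, _, h3, h4, _⟩
  obtain ⟨b, hb⟩ := h3
  have hdiv : n / a = b := by rw [hb]; exact Int.mul_ediv_cancel_left _ (by omega)
  rw [hdiv] at h4
  by_cases h2a : (2:Int) ∣ a
  · have h2b : (2:Int) ∣ b := by omega
    obtain ⟨a', rfl⟩ := h2a
    obtain ⟨b', rfl⟩ := h2b
    have : (4:Int) ∣ n := ⟨a' * b', by rw [hb]; ring⟩
    omega
  · have h2ab : (2:Int) ∣ a * b := by rw [← hb]; omega
    rcases Int.prime_two.dvd_or_dvd h2ab with h | h
    · exact h2a h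
    · omega

-- ===== VERDICT (by name: the statement is the Claim_ definition above) =====
theorem sol_equa_spec : Claim_equal_sol_equa := by
  intro n _ hpre
  have hn : (0:Int) ≤ n := hpre
  show sol_equa n = sol_equa_alt n
  rw [sol_equa_eq_sorted_core]
  have hpair := pairwise_solACore hn
  rw [PySem.List.sorted_rev_eq_self_of_pairwise (solACore n)
      (fun pair => PySem.List.pyGetD pair 0 0) (hpair.imp (fun h => le_of_lt h))]
  have hm4 : PySem.Int.mod n 4 = n % 4 := (pysem_conv (by norm_num : (0:Int) < 4)).1
  have hfd : PySem.Int.floordiv n 4 = n / 4 := (pysem_conv (by norm_num : (0:Int) < 4)).2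
  simp only [sol_equa_alt, hm4, hfd]
  have hr : n % 4 = 0 ∨ n % 4 = 1 ∨ n % 4 = 2 ∨ n % 4 = 3 := by omega
  rcases hr with h4 | h4 | h4 | h4
  · -- 4 | n : the even-branch scan over m = n / 4
    simp only [h4]
    norm_num
    set m : Int := n / 4 with hmdef
    have hm : n = 4 * m := by omega
    have hm0 : 0 ≤ m := by omega
    have hf : m < 1 + ((m.toNat + 1 : Nat) : Int) := by push_cast; omega
    refine List.Perm.eq_of_pairwise (fun _ _ _ _ hpq hqp => absurd hpq (lt_asymm hqp)) hpair
      (pairwise_goEven (m.toNat + 1) 1 (by norm_num) hf)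
      ((List.perm_ext_iff_of_nodup (nodup_of_pairwise_rHead hpair)
        (nodup_of_pairwise_rHead (pairwise_goEven (m.toNat + 1) 1 (by norm_num) hf))).mpr ?_)
    intro p
    exact (mem_solACore hn p).trans ((even_bridge hm p).trans
      (mem_goEven (m.toNat + 1) 1 (by norm_num) hf p).symm)
  · -- n odd: the odd-divisor scan
    simp only [h4]
    norm_num
    have hodd : ¬ (2:Int) ∣ n := by omega
    have hf : n < 1 + 2 * ((n.toNat + 1 : Nat) : Int) := by push_cast; omega
    refine List.Perm.eq_of_pairwise (fun _ _ _ _ hpq hqp => absurd hpq (lt_asymm hqp)) hpair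
      (pairwise_goOdd hodd (n.toNat + 1) 1 (by norm_num) hf)
      ((List.perm_ext_iff_of_nodup (nodup_of_pairwise_rHead hpair)
        (nodup_of_pairwise_rHead (pairwise_goOdd hodd (n.toNat + 1) 1 (by norm_num) hf))).mpr ?_)
    intro p
    exact (mem_solACore hn p).trans ((odd_bridge hodd p).trans
      (mem_goOdd (n.toNat + 1) 1 (by norm_num) hf p).symm)
  · -- n = 2 (mod 4): both sides are empty
    simp only [h4]
    norm_num
    rw [List.eq_nil_iff_forall_not_mem]
    intro p hp
    obtain ⟨a, hsa, _⟩ := (mem_solACore hn p).mp hp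
    exact no_sol_case2 h4 a hsa
  · -- n odd: the odd-divisor scan
    simp only [h4]
    norm_num
    have hodd : ¬ (2:Int) ∣ n := by omega
    have hf : n < 1 + 2 * ((n.toNat + 1 : Nat) : Int) := by push_cast; omega
    refine List.Perm.eq_of_pairwise (fun _ _ _ _ hpq hqp => absurd hpq (lt_asymm hqp)) hpair
      (pairwise_goOdd hodd (n.toNat + 1) 1 (by norm_num) hf)
      ((List.perm_ext_iff_of_nodup (nodup_of_pairwise_rHead hpair)
        (nodup_of_pairwise_rHead (pairwise_goOdd hodd (n.toNat + 1) 1 (by norm_num) hf))).mpr ?_)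
    intro p
    exact (mem_solACore hn p).trans ((odd_bridge hodd p).trans
      (mem_goOdd (n.toNat + 1) 1 (by norm_num) hf p).symm)

theorem sol_equa_raises : Claim_raises_sol_equa := by
  unfold Claim_raises_sol_equa
  refine ⟨fun n _ h => ?_, by decide⟩
  unfold Raises_sol_equa at h
  unfold Pre_sol_equa
  omega

-- self-check: the raise witness is inside Raises_ and B's port returns the stated value there
theorem pvRaiseWitness_ok :
    Raises_sol_equa pvRaiseWitness_sol_equa ∧
      sol_equa_alt pvRaiseWitness_sol_equa = pvRaiseWitnessOut_sol_equa :=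
  ⟨sol_equa_raises.2.2.1, sol_equa_raises.2.2.2⟩
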